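-- pv_equiv track=rewrite | github.com/rxu0112/WR-CP | guaranteed/plot_guaranteed_result.py | find_position_unsorted
-- ===== SOURCE A (Python) =====
-- def find_position_unsorted(arr, value):
--     best_index = -1
--     best_value = None
--     for i, elem in enumerate(arr):
--         if elem < value and (best_value is None or elem > best_value):
--             best_value = elem
--             best_index = i
--     return best_index if best_index != -1 else None
-- ===== SOURCE B (Python) =====
-- def find_position_unsorted(arr, value):
--     candidates = [x for x in arr if x < value]
--     if not candidates:
--         return None
--     return arr.index(max(candidates))
-- ===== Notes on version B (the rewrite author's own statement) =====
-- stated objective: simpler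
-- what changed: Replaces A's single fused scan tracking (best_value, best_index) with two plain passes: filter the elements strictly below value, take their max, and locate its first index with arr.index.
import Mathlib
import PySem

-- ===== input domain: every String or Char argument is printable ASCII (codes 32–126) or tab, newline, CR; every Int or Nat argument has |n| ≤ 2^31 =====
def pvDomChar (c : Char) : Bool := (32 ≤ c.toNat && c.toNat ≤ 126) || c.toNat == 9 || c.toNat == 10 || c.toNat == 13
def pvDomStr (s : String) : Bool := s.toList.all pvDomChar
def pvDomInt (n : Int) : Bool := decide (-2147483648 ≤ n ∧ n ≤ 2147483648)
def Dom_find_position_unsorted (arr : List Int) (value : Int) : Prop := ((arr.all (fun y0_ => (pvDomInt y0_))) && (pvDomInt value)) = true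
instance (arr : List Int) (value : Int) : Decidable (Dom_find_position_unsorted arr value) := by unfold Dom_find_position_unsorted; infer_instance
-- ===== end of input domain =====

-- B replaces A's fused best-value/best-index scan by two plain passes (filter+max, then first index); same O(n) cost.

-- ===== PORT A =====
-- loop body: 'if elem < value and (best_value is None or elem > best_value): best_value = elem; best_index = i'
def pvStep (value : Int) (s : Int × Option Int) (p : Int × Int) : Int × Option Int :=
  match s.2 with
  | none => if p.2 < value then (p.1, some p.2) else s
  | some b => if p.2 < value ∧ b < p.2 then (p.1, some p.2) else s

def find_position_unsorted (arr : List Int) (value : Int) : Option Int :=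
  let st := (PySem.List.enumerate arr).foldl (pvStep value) (-1, none)
  if st.1 ≠ -1 then some st.1 else none

-- ===== PORT B =====
def find_position_unsorted_alt (arr : List Int) (value : Int) : Option Int :=
  let candidates := arr.filter (fun x => decide (x < value))
  match PySem.List.max? candidates (fun y => y) with
  | none => none
  | some best => (PySem.List.index? arr best).map (fun k => (k : Int))

-- ===== PRECONDITION & SPEC =====
def Spec_find_position_unsorted (arr : List Int) (value : Int) (out : Option Int) : Prop := out = find_position_unsorted_alt arr value
instance (arr : List Int) (value : Int) (out : Option Int) : Decidable (Spec_find_position_unsorted arr value out) := by unfold Spec_find_position_unsorted; infer_instance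

-- ===== CLAIM (what is proved, stated in full; the proofs are below) =====
def Claim_equal_find_position_unsorted : Prop := ∀ (arr : List Int) (value : Int), Dom_find_position_unsorted arr value → Spec_find_position_unsorted arr value (find_position_unsorted arr value)

-- ===== LEMMAS AND PROOFS =====

-- maximum of a list, Python-max shape
def pvMax? : List Int → Option Int
  | [] => none
  | h :: t => some (t.foldl max h)

def pvBeats : Option Int → Int → Bool
  | none, _ => true
  | some b, m => decide (b < m)

-- closed form of A's loop state
def pvRes (value i0 bi : Int) (bv : Option Int) (t : List Int) : Int × Option Int :=
  match pvMax? (t.filter (fun x => decide (x < value))) with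
  | none => (bi, bv)
  | some m => if pvBeats bv m then (i0 + (t.idxOf m : Int), some m) else (bi, bv)

theorem foldl_max_mem (t : List Int) (h : Int) : t.foldl max h ∈ h :: t := by
  induction t generalizing h with
  | nil => simp
  | cons a t ih =>
    simp only [List.foldl_cons]
    rcases List.mem_cons.mp (ih (max h a)) with he | ht
    · rw [he]; rcases max_choice h a with hc | hc <;> simp [hc]
    · simp [ht]

theorem pvMax?_mem {l : List Int} {m : Int} (h : pvMax? l = some m) : m ∈ l := by
  cases l with
  | nil => simp [pvMax?] at h
  | cons a t =>
    simp only [pvMax?, Option.some.injEq] at h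
    subst h; exact foldl_max_mem t a

theorem foldl_max_out (t : List Int) : ∀ x a : Int, List.foldl max (max x a) t = max x (t.foldl max a) := by
  induction t with
  | nil => intro x a; simp
  | cons c t ih =>
    intro x a
    simp only [List.foldl_cons]
    rw [max_assoc, ih x (max a c)]

theorem pvMax?_cons (x : Int) (l : List Int) :
    pvMax? (x :: l) = some (match pvMax? l with | none => x | some m => max x m) := by
  cases l with
  | nil => simp [pvMax?]
  | cons a t =>
    simp only [pvMax?, Option.some.injEq, List.foldl_cons]
    exact foldl_max_out t x a

theorem max?_eq_pvMax? (l : List Int) : PySem.List.max? l (fun y => y) = pvMax? l := by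
  cases l with
  | nil => simp [pvMax?]
  | cons a t => rw [PySem.List.max?_id_cons]; rfl

theorem pvFold_eq_pvRes (value : Int) (t : List Int) :
    ∀ (i0 bi : Int) (bv : Option Int),
      (PySem.List.enumerate t i0).foldl (pvStep value) (bi, bv) = pvRes value i0 bi bv t := by
  induction t with
  | nil => intro i0 bi bv; simp [PySem.List.enumerate_nil, pvRes, pvMax?]
  | cons x t ih =>
    intro i0 bi bv
    rw [PySem.List.enumerate_cons, List.foldl_cons]
    by_cases hx : x < value
    · -- x is a candidate
      have hfilt : (x :: t).filter (fun x => decide (x < value))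
          = x :: t.filter (fun x => decide (x < value)) := by simp [List.filter, hx]
      by_cases hb : pvBeats bv x = true
      · -- state updates to (i0, some x)
        have hstep : pvStep value (bi, bv) (i0, x) = (i0, some x) := by
          cases bv with
          | none => simp [pvStep, hx]
          | some b => simp [pvBeats] at hb; simp [pvStep, hx, hb]
        rw [hstep, ih]
        unfold pvRes
        rw [hfilt, pvMax?_cons]
        cases hm : pvMax? (t.filter (fun x => decide (x < value))) with
        | none =>
          simp only [hm]
          have : (x :: t).idxOf x = 0 := by simp [List.idxOf_cons]
          cases bv with
          | none => simp [pvBeats, this]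
          | some b =>
            simp [pvBeats] at hb
            simp [pvBeats, this, hb]
        | some m =>
          simp only [hm]
          have hmxval : (if pvBeats bv (max x m) = true then
              (i0 + ((x :: t).idxOf (max x m) : Int), some (max x m)) else (bi, bv))
              = (i0 + ((x :: t).idxOf (max x m) : Int), some (max x m)) := by
            cases bv with
            | none => simp [pvBeats]
            | some b =>
              simp [pvBeats] at hb
              have : b < max x m := lt_of_lt_of_le hb (le_max_left x m)
              simp [pvBeats, this]
          rw [hmxval]
          by_cases hxm : x < m
          · -- new max comes from the tail
            have hmax : max x m = m := max_eq_right (le_of_lt hxm)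
            have hne : x ≠ m := ne_of_lt hxm
            have hidx : ((x :: t).idxOf m : Int) = (t.idxOf m : Int) + 1 := by
              simp [List.idxOf_cons, hne]
            simp only [pvBeats, hxm, decide_true, if_true, hmax, hidx]
            simp only [Prod.mk.injEq]
            exact ⟨by omega, trivial⟩
          · have hmax : max x m = x := max_eq_left (le_of_not_gt hxm)
            have hidx : (x :: t).idxOf (max x m) = 0 := by simp [hmax, List.idxOf_cons]
            have hnb : pvBeats (some x) m = false := by simp [pvBeats]; omega
            simp [hnb, hmax, hidx]
      · -- bv = some b with x ≤ b: state unchanged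
        cases bv with
        | none => simp [pvBeats] at hb
        | some b =>
          simp [pvBeats] at hb
          have hstep : pvStep value (bi, some b) (i0, x) = (bi, some b) := by
            simp [pvStep, hx]; omega
          rw [hstep, ih]
          unfold pvRes
          rw [hfilt, pvMax?_cons]
          cases hm : pvMax? (t.filter (fun x => decide (x < value))) with
          | none =>
            simp only [hm]
            have : pvBeats (some b) x = false := by simp [pvBeats]; omega
            simp [this]
          | some m =>
            simp only [hm]
            by_cases hbm : b < m
            · have hxm : x < m := lt_of_le_of_lt hb hbm
              have hmax : max x m = m := max_eq_right (le_of_lt hxm)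
              have hne : x ≠ m := ne_of_lt hxm
              have hidx : ((x :: t).idxOf m : Int) = (t.idxOf m : Int) + 1 := by
                simp [List.idxOf_cons, hne]
              have h1 : pvBeats (some b) m = true := by simp [pvBeats, hbm]
              simp only [hmax, h1, if_true, hidx]
              simp only [Prod.mk.injEq]
              exact ⟨by omega, trivial⟩
            · have h1 : pvBeats (some b) m = false := by simp [pvBeats]; omega
              have h2 : pvBeats (some b) (max x m) = false := by
                simp [pvBeats]; constructor <;> omega
              simp [h1, h2]
    · -- x not a candidate: state unchanged, filter unchanged
      have hstep : pvStep value (bi, bv) (i0, x) = (bi, bv) := by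
        cases bv with
        | none => simp [pvStep, hx]
        | some b => simp [pvStep, hx]
      have hfilt : (x :: t).filter (fun x => decide (x < value))
          = t.filter (fun x => decide (x < value)) := by simp [List.filter, hx]
      rw [hstep, ih]
      unfold pvRes
      rw [hfilt]
      cases hm : pvMax? (t.filter (fun x => decide (x < value))) with
      | none => rfl
      | some m =>
        have hmv : m < value := by
          have := pvMax?_mem hm
          have := List.of_mem_filter this
          simpa using this
        have hne : x ≠ m := by omega
        have hidx : ((x :: t).idxOf m : Int) = (t.idxOf m : Int) + 1 := by
          simp [List.idxOf_cons, hne]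
        cases hbt : pvBeats bv m with
        | false => simp [hbt]
        | true =>
          simp only [hbt, if_true, hidx]
          simp only [Prod.mk.injEq]
          exact ⟨by omega, trivial⟩

theorem idxOf_eq_of_index? {arr : List Int} {m : Int} (h : m ∈ arr) :
    PySem.List.index? arr m = some (arr.idxOf m) := by
  rw [PySem.List.index?_eq_idxOf?, List.idxOf_eq_getD_idxOf?]
  cases hk : List.idxOf? m arr with
  | none =>
    have hn : PySem.List.index? arr m = none := by rw [PySem.List.index?_eq_idxOf?, hk]
    rw [PySem.List.index?_eq_none_iff] at hn
    exact absurd h hn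
  | some k => simp

theorem find_position_unsorted_eq (arr : List Int) (value : Int) :
    find_position_unsorted arr value = find_position_unsorted_alt arr value := by
  simp only [find_position_unsorted, find_position_unsorted_alt]
  rw [pvFold_eq_pvRes, max?_eq_pvMax?]
  unfold pvRes
  cases hm : pvMax? (arr.filter (fun x => decide (x < value))) with
  | none => simp
  | some m =>
    have hmem : m ∈ arr := List.mem_of_mem_filter (pvMax?_mem hm)
    have hidx := idxOf_eq_of_index? hmem
    simp only [pvBeats, if_true]
    have hge : (0 : Int) ≤ (arr.idxOf m : Int) := Int.natCast_nonneg _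
    have hne : (0 : Int) + (arr.idxOf m : Int) ≠ -1 := by omega
    rw [PySem.List.index?_eq_idxOf?] at hidx
    simp [hne, hidx]

-- ===== VERDICT (by name: the statement is the Claim_ definition above) =====
theorem find_position_unsorted_spec : Claim_equal_find_position_unsorted := by
  intro arr value _
  unfold Spec_find_position_unsorted
  exact find_position_unsorted_eq arr value
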